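-- pv_equiv track=rewrite | github.com/byteAziz/Simple-Type-Analizer | hm.py | fromInputToOutputFormat
-- ===== SOURCE A (Python) =====
-- def fromInputToOutputFormat(type_expr: str) -> str:
--     types = type_expr.split('->')
--     if len(types) == 1:
--         return f'{type_expr.strip()}'
--
--     result = types[-1].strip()
--     for part in reversed(types[:-1]):
--         result = f'({part.strip()} -> {result})'
--     return result
-- ===== SOURCE B (Python) =====
-- def fromInputToOutputFormat(type_expr: str) -> str:
--     head, sep, rest = type_expr.partition('->')
--     if not sep:
--         return type_expr.strip()
--     return f'({head.strip()} -> {fromInputToOutputFormat(rest)})'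
-- ===== Notes on version B (the rewrite author's own statement) =====
-- stated objective: simpler
-- what changed: Replaces A's split-into-all-parts plus reversed accumulator loop by a direct recursion that peels one '->' off the front with str.partition and recurses on the remainder.
import Mathlib
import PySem

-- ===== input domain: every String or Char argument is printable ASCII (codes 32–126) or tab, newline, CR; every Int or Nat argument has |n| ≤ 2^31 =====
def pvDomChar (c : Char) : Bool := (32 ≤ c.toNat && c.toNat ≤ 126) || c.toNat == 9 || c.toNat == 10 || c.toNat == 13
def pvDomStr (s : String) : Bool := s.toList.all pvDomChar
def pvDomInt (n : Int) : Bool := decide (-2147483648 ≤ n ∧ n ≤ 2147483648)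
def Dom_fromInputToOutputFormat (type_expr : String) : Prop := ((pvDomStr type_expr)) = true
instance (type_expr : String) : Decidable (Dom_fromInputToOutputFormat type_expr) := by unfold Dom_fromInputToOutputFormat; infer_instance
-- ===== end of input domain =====

-- B replaces A's split + reversed accumulator loop by a single left-to-right recursion that
-- peels one '->' at a time with str.partition (objective: simpler decomposition, same cost).

-- ===== PORT A =====
-- A: split on '->', then build the nested form right-to-left with an accumulator.
def fromInputToOutputFormat (type_expr : String) : String :=
  let types := PySem.Chars.splitOn type_expr.toList ['-', '>']   -- type_expr.split('->'); sep ≠ '' so Python's split always returns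
  if types.length = 1 then String.ofList (PySem.Chars.strip type_expr.toList)
  else
    let result := PySem.Chars.strip ((PySem.List.pyGet? types (-1)).getD [])  -- types[-1]: never none (split is nonempty)
    String.ofList ((PySem.List.slice types none (some (-1))).reverse.foldl
      (fun result part => '(' :: PySem.Chars.strip part ++ [' ', '-', '>', ' '] ++ result ++ [')'])
      result)

-- ===== PORT B =====
-- exact hand port of Python's str.partition('->') on code points: none when '->' does not
-- occur, otherwise (text before the first '->', text after it)
def partArrow : List Char → Option (List Char × List Char)
  | [] => none
  | c :: rest =>
    if c = '-' ∧ rest.head? = some '>' then some ([], rest.tail)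
    else (partArrow rest).map (fun p => (c :: p.1, p.2))

theorem partArrow_lt (l : List Char) : ∀ h r, partArrow l = some (h, r) → r.length < l.length := by
  induction l with
  | nil => intro h r hx; simp [partArrow] at hx
  | cons c rest ih =>
    intro h r hx
    simp only [partArrow] at hx
    split at hx
    · simp only [Option.some.injEq, Prod.mk.injEq] at hx
      obtain ⟨rfl, rfl⟩ := hx
      simp only [List.length_tail, List.length_cons]
      omega
    · simp only [Option.map_eq_some_iff] at hx
      obtain ⟨⟨h', r'⟩, hp, he⟩ := hx
      simp only [Prod.mk.injEq] at he
      obtain ⟨-, rfl⟩ := he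
      have := ih h' r' hp
      simp only [List.length_cons]
      omega

-- B's worker: recursively peel the first '->' off the front
def goB (l : List Char) : List Char :=
  match hp : partArrow l with
  | none => PySem.Chars.strip l
  | some (h, r) => '(' :: PySem.Chars.strip h ++ [' ', '-', '>', ' '] ++ goB r ++ [')']
termination_by l.length
decreasing_by exact partArrow_lt l h r hp

def fromInputToOutputFormat_alt (type_expr : String) : String :=
  String.ofList (goB type_expr.toList)

-- ===== PRECONDITION & SPEC =====
def Spec_fromInputToOutputFormat (type_expr : String) (out : String) : Prop := out = fromInputToOutputFormat_alt type_expr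
instance (type_expr : String) (out : String) : Decidable (Spec_fromInputToOutputFormat type_expr out) := by unfold Spec_fromInputToOutputFormat; infer_instance

-- ===== CLAIM (what is proved, stated in full; the proofs are below) =====
def Claim_equal_fromInputToOutputFormat : Prop := ∀ (type_expr : String), Dom_fromInputToOutputFormat type_expr → Spec_fromInputToOutputFormat type_expr (fromInputToOutputFormat type_expr)

-- ===== LEMMAS AND PROOFS =====

-- apply f to the head of a list (if any)
def pvModHead (f : List Char → List Char) : List (List Char) → List (List Char)
  | [] => []
  | h :: t => f h :: t

theorem pvModHead_id (xs : List (List Char)) : pvModHead (fun h => h) xs = xs := by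
  cases xs <;> rfl

-- fuel-free specification of splitOn _ ['-','>']
def pvSplitArrow : List Char → List (List Char)
  | [] => [[]]
  | c :: rest =>
    if c = '-' ∧ rest.head? = some '>' then [] :: pvSplitArrow rest.tail
    else pvModHead (c :: ·) (pvSplitArrow rest)
termination_by l => l.length
decreasing_by
  · cases rest <;> simp <;> omega
  · simp

theorem pvSplitArrow_ne_nil (l : List Char) : pvSplitArrow l ≠ [] := by
  fun_induction pvSplitArrow l with
  | case1 => simp
  | case2 => simp
  | case3 c rest _ ih =>
    cases h : pvSplitArrow rest with
    | nil => exact absurd h ih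
    | cons a t => simp [pvModHead]

theorem pvGo_zero (l cur : List Char) (acc : List (List Char)) :
    PySem.Chars.splitOn.go ['-', '>'] 0 l cur acc = ((cur.reverse ++ l) :: acc).reverse := by
  rw [PySem.Chars.splitOn.go.eq_def]

theorem pvGo_succ_nil (fuel : Nat) (cur : List Char) (acc : List (List Char)) :
    PySem.Chars.splitOn.go ['-', '>'] (fuel + 1) [] cur acc = (cur.reverse :: acc).reverse := by
  rw [PySem.Chars.splitOn.go.eq_def]

theorem pvGo_succ_cons (fuel : Nat) (c : Char) (rest cur : List Char) (acc : List (List Char)) :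
    PySem.Chars.splitOn.go ['-', '>'] (fuel + 1) (c :: rest) cur acc =
      if ['-', '>'].isPrefixOf (c :: rest) then
        PySem.Chars.splitOn.go ['-', '>'] fuel (List.drop 2 (c :: rest)) [] (cur.reverse :: acc)
      else PySem.Chars.splitOn.go ['-', '>'] fuel rest (c :: cur) acc := by
  rw [PySem.Chars.splitOn.go.eq_def]
  rfl

theorem pvGo_eq (fuel : Nat) : ∀ (l cur : List Char) (acc : List (List Char)), l.length ≤ fuel →
    PySem.Chars.splitOn.go ['-', '>'] fuel l cur acc
      = acc.reverse ++ pvModHead (fun h => cur.reverse ++ h) (pvSplitArrow l) := by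
  induction fuel with
  | zero =>
    intro l cur acc hl
    have hnil : l = [] := by cases l <;> simp_all
    subst hnil
    rw [pvGo_zero]
    simp [pvSplitArrow, pvModHead]
  | succ fuel ih =>
    intro l cur acc hl
    cases l with
    | nil =>
      rw [pvGo_succ_nil]
      simp [pvSplitArrow, pvModHead]
    | cons c rest =>
      rw [pvGo_succ_cons]
      cases rest with
      | nil =>
        rw [if_neg (by simp [List.isPrefixOf])]
        rw [ih [] (c :: cur) acc (by simp)]
        simp [pvSplitArrow, pvModHead]
      | cons d r =>
        by_cases hcd : c = '-' ∧ d = '>'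
        · obtain ⟨rfl, rfl⟩ := hcd
          rw [if_pos (by simp [List.isPrefixOf])]
          have hr : r.length ≤ fuel := by
            simp only [List.length_cons] at hl
            omega
          rw [show List.drop 2 ('-' :: '>' :: r) = r from rfl]
          rw [ih r [] (cur.reverse :: acc) hr]
          have hs : pvSplitArrow ('-' :: '>' :: r) = [] :: pvSplitArrow r := by
            rw [pvSplitArrow]
            simp
          rw [hs]
          simp only [List.reverse_cons, List.reverse_nil, List.nil_append, pvModHead,
            List.append_nil, List.append_assoc, List.cons_append]
          cases pvSplitArrow r <;> rfl
        · rw [if_neg (by simp [List.isPrefixOf]; intro h1 h2; exact hcd ⟨h1.symm, h2.symm⟩)]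
          rw [ih (d :: r) (c :: cur) acc (by simp only [List.length_cons] at hl ⊢; omega)]
          have hs : pvSplitArrow (c :: d :: r) = pvModHead (c :: ·) (pvSplitArrow (d :: r)) := by
            rw [pvSplitArrow]
            rw [if_neg (by simpa using hcd)]
          rw [hs]
          cases pvSplitArrow (d :: r) <;> simp [pvModHead]

theorem pvSplitOn_eq (l : List Char) :
    PySem.Chars.splitOn l ['-', '>'] = pvSplitArrow l := by
  have h := pvGo_eq (l.length + 1) l [] [] (by omega)
  simpa [PySem.Chars.splitOn, pvModHead_id] using h

theorem pvPart_none (l : List Char) (h : partArrow l = none) : pvSplitArrow l = [l] := by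
  fun_induction pvSplitArrow l with
  | case1 => rfl
  | case2 c rest hc => simp [partArrow, hc] at h
  | case3 c rest hc ih =>
    simp only [partArrow, if_neg hc, Option.map_eq_none_iff] at h
    rw [ih h, pvModHead]

theorem pvPart_some (l : List Char) : ∀ hd r, partArrow l = some (hd, r) →
    pvSplitArrow l = hd :: pvSplitArrow r := by
  fun_induction pvSplitArrow l with
  | case1 => intro hd r h; simp [partArrow] at h
  | case2 c rest hc =>
    intro hd r h
    simp only [partArrow, if_pos hc, Option.some.injEq, Prod.mk.injEq] at h
    obtain ⟨rfl, rfl⟩ := h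
    rfl
  | case3 c rest hc ih =>
    intro hd r h
    simp only [partArrow, if_neg hc, Option.map_eq_some_iff] at h
    obtain ⟨⟨h', r'⟩, hp, he⟩ := h
    obtain ⟨rfl, rfl⟩ := Prod.mk.injEq .. ▸ he
    rw [ih h' r' hp, pvModHead]

-- the right-associative printer the two programs share
def pvCharGo : List (List Char) → List Char
  | [] => []
  | [p] => PySem.Chars.strip p
  | p :: ps => '(' :: PySem.Chars.strip p ++ [' ', '-', '>', ' '] ++ pvCharGo ps ++ [')']

theorem pvFold_eq (ts : List (List Char)) (hne : ts ≠ []) :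
    (ts.dropLast.reverse).foldl
        (fun result part => '(' :: PySem.Chars.strip part ++ [' ', '-', '>', ' '] ++ result ++ [')'])
        (PySem.Chars.strip ((PySem.List.pyGet? ts (-1)).getD []))
      = pvCharGo ts := by
  induction ts with
  | nil => exact absurd rfl hne
  | cons a ts ih =>
    cases ts with
    | nil => simp [PySem.List.pyGet?_neg_one, pvCharGo]
    | cons b t =>
      have hbt : (b :: t : List (List Char)) ≠ [] := by simp
      have hlast : (a :: b :: t).getLast? = (b :: t).getLast? := by
        simp [List.getLast?_cons_cons]
      rw [PySem.List.pyGet?_neg_one, hlast, ← PySem.List.pyGet?_neg_one]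
      have hdl : (a :: b :: t).dropLast = a :: (b :: t).dropLast := by
        simp [List.dropLast_cons_of_ne_nil hbt]
      rw [hdl]
      simp only [List.reverse_cons, List.foldl_append, List.foldl_cons, List.foldl_nil]
      rw [ih hbt]
      rfl

theorem pvGoB_eq (l : List Char) : goB l = pvCharGo (pvSplitArrow l) := by
  fun_induction goB l with
  | case1 l hp => rw [pvPart_none l hp]; rfl
  | case2 l hd r hp ih =>
    rw [pvPart_some l hd r hp]
    cases h : pvSplitArrow r with
    | nil => exact absurd h (pvSplitArrow_ne_nil r)
    | cons x xs =>
      rw [h] at ih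
      simp only [pvCharGo, ih]

-- ===== VERDICT (by name: the statement is the Claim_ definition above) =====
theorem fromInputToOutputFormat_spec : Claim_equal_fromInputToOutputFormat := by
  intro s _
  unfold Spec_fromInputToOutputFormat fromInputToOutputFormat fromInputToOutputFormat_alt
  rw [pvSplitOn_eq, pvGoB_eq]
  cases hp : partArrow s.toList with
  | none =>
    rw [pvPart_none _ hp]
    rfl
  | some p =>
    obtain ⟨hd, r⟩ := p
    rw [pvPart_some _ hd r hp]
    cases h : pvSplitArrow r with
    | nil => exact absurd h (pvSplitArrow_ne_nil r)
    | cons x xs =>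
      simp only [List.length_cons, PySem.List.slice_to_neg_one]
      rw [if_neg (by omega)]
      rw [pvFold_eq (hd :: x :: xs) (by simp)]
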